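-- pv_equiv track=rewrite | github.com/pypi-data/pypi-mirror-401 | packages/onshape-robotics-toolkit/onshape_robotics_toolkit-0.5.0.tar.gz/onshape_robotics_toolkit-0.5.0/onshape_robotics_toolkit/utilities/helpers.py | make_unique_keys
-- ===== SOURCE A (Python) =====
-- def make_unique_keys(keys: list[str]) -> dict[str, int]:
--     """
--     Make a list of keys unique by appending a number to duplicate keys and
--     return a mapping of unique keys to their original indices.
--
--     Args:
--         keys: List of keys.
--
--     Returns:
--         A dictionary mapping unique keys to their original indices.
--
--     Examples:
--         >>> make_unique_keys(["a", "b", "a", "a"])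
--         {"a": 0, "b": 1, "a-1": 2, "a-2": 3}
--     """
--     unique_key_map = {}
--     key_count: dict[str, int] = {}
--
--     for index, key in enumerate(keys):
--         if key in key_count:
--             key_count[key] += 1
--             unique_key = f"{key}-{key_count[key]}"
--         else:
--             key_count[key] = 0
--             unique_key = key
--
--         unique_key_map[unique_key] = index
--
--     return unique_key_map
-- ===== SOURCE B (Python) =====
-- def make_unique_keys(keys: list[str]) -> dict[str, int]:
--     # Pass 1: group the original indices of each key.
--     positions = {}
--     for index, key in enumerate(keys):
--         positions.setdefault(key, []).append(index)
--     # Pass 2: number each group (bare first occurrence, '-n' for repeats).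
--     renamed = []
--     for key, idxs in positions.items():
--         renamed.append((key, idxs[0]))
--         for n in range(1, len(idxs)):
--             renamed.append((f"{key}-{n}", idxs[n]))
--     # Restore the original emission order and build the result dict.
--     renamed.sort(key=lambda item: item[1])
--     return dict(renamed)
-- ===== Notes on version B (the rewrite author's own statement) =====
-- stated objective: alternative
-- what changed: Replaced the single interleaved count-and-emit loop over two mutable dicts with a different decomposition: one grouping pass building a key -> original-indices table, a per-group numbering pass emitting (unique name, index) pairs, and a final sort by original index before building the result dict.
import Mathlib
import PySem

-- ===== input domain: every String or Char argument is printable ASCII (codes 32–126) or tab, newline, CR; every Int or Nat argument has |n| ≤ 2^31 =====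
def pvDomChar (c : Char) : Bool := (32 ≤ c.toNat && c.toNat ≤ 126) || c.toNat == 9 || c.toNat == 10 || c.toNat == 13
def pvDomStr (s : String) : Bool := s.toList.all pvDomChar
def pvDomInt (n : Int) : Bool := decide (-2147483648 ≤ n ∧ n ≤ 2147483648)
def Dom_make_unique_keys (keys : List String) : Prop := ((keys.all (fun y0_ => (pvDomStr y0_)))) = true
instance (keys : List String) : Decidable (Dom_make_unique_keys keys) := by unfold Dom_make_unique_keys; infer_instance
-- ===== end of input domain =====

-- B replaces A's interleaved count-and-emit loop by a grouping pass (key -> index list),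
-- a per-group numbering pass, and a sort by original index (alternative decomposition).


-- f"{key}-{n}" (shared literally by both Pythons)
def mkSuffixed (key : String) (n : Int) : String :=
  String.ofList (key.toList ++ '-' :: PySem.Int.toChars n)

-- ===== PORT A =====
-- loop body: state = (unique_key_map, key_count)
def aStep (st : PySem.Dict String Int × PySem.Dict String Int) (p : Int × String) :
    PySem.Dict String Int × PySem.Dict String Int :=
  if st.2.contains p.2 then
    -- key_count[key] += 1; unique_key = f"{key}-{key_count[key]}"
    let n := st.2.getD p.2 0 + 1
    (st.1.insert (mkSuffixed p.2 n) p.1, st.2.insert p.2 n)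
  else
    -- key_count[key] = 0; unique_key = key
    (st.1.insert p.2 p.1, st.2.insert p.2 0)

def make_unique_keys (keys : List String) : List (String × Int) :=
  (((PySem.List.enumerate keys 0).foldl aStep (PySem.Dict.empty, PySem.Dict.empty)).1).items

-- ===== PORT B =====
def make_unique_keys_alt (keys : List String) : List (String × Int) :=
  -- positions: key -> list of its original indices (setdefault(key, []).append(index))
  let positions := (PySem.List.enumerate keys 0).foldl
    (fun d p => d.modify p.2 [] (· ++ [p.1])) PySem.Dict.empty
  -- renamed: for each group append (key, idxs[0]) then (f"{key}-{n}", idxs[n]) for n in range(1, len(idxs))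
  let renamed := positions.items.foldl
    (fun acc kid =>
      (PySem.List.pyRange 1 ((kid.2.length : Int)) 1).foldl
        (fun acc2 n => acc2 ++ [(mkSuffixed kid.1 n, PySem.List.pyGetD kid.2 n (-1))])
        (acc ++ [(kid.1, PySem.List.pyGetD kid.2 0 (-1))]))
    []
  -- renamed.sort(key=lambda item: item[1]); dict(renamed)
  ((PySem.List.sorted renamed (fun item => item.2) false).foldl
    (fun d p => d.insert p.1 p.2) PySem.Dict.empty).items

-- ===== PRECONDITION & SPEC =====
def Spec_make_unique_keys (keys : List String) (out : List (String × Int)) : Prop := out = make_unique_keys_alt keys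
instance (keys : List String) (out : List (String × Int)) : Decidable (Spec_make_unique_keys keys out) := by unfold Spec_make_unique_keys; infer_instance

-- ===== CLAIM (what is proved, stated in full; the proofs are below) =====
def Claim_equal_make_unique_keys : Prop := ∀ (keys : List String), Dom_make_unique_keys keys → Spec_make_unique_keys keys (make_unique_keys keys)

-- ===== LEMMAS AND PROOFS =====

-- the common spine: the sequence of (unique name, index) pairs in original order,
-- `pre` being the already-processed prefix
def nameOf (k : String) (c : Nat) : String := if c = 0 then k else mkSuffixed k (c : Int)

def emitAux : List String → List String → Int → List (String × Int)
  | _, [], _ => []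
  | pre, k :: rest, i => (nameOf k (pre.count k), i) :: emitAux (pre ++ [k]) rest (i + 1)

-- what one group (key, its index list) contributes, in clean form
def emitOf (k : String) (idxs : List Int) : List (String × Int) :=
  [(k, PySem.List.pyGetD idxs 0 (-1))] ++
    (PySem.List.pyRange 1 ((idxs.length : Int)) 1).map
      (fun n => (mkSuffixed k n, PySem.List.pyGetD idxs n (-1)))

-- the grouping dict as a function of the enumerated list
def grp (l : List (Int × String)) : PySem.Dict String (List Int) :=
  l.foldl (fun d p => d.modify p.2 [] (· ++ [p.1])) PySem.Dict.empty

lemma emitAux_append (xs : List String) : ∀ (ys pre : List String) (i : Int),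
    emitAux pre (xs ++ ys) i = emitAux pre xs i ++ emitAux (pre ++ xs) ys (i + xs.length) := by
  induction xs with
  | nil => intro ys pre i; simp [emitAux]
  | cons x xs ih =>
    intro ys pre i
    simp only [List.cons_append, emitAux, ih, List.append_assoc, List.nil_append,
      List.length_cons]
    rw [show i + 1 + (xs.length : Int) = i + ((xs.length + 1 : Nat) : Int) by push_cast; ring]

lemma grp_eq_swap (l : List (Int × String)) :
    grp l = (l.map Prod.swap).foldl
      (fun (d : PySem.Dict String (List Int)) (p : String × Int) => d.modify p.1 [] (fun v => v ++ [p.2]))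
      PySem.Dict.empty := by
  rw [List.foldl_map]; rfl

lemma grp_getD (l : List (Int × String)) (k : String) :
    (grp l).getD k [] = (l.filter (fun p => p.2 == k)).map (·.1) := by
  rw [grp_eq_swap, PySem.Dict.getD_foldl_modify_append]
  simp [List.filter_map, Function.comp_def, PySem.Dict.getD_empty]

lemma grp_keys (l : List (Int × String)) :
    (grp l).keys = PySem.Set.ofList (l.map (·.2)) := by
  have h := PySem.Dict.keys_foldl_modify_key l (key := fun p => p.2)
    (d0 := ([] : List Int))
    (f := fun (_ : PySem.Dict String (List Int)) (p : Int × String) => (fun v => v ++ [p.1]))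
    (d := PySem.Dict.empty)
  rw [grp]
  simp only [h, PySem.Dict.keys_empty, PySem.Set.update_nil_left]

lemma grp_nodup (l : List (Int × String)) : (grp l).keys.Nodup := by
  rw [grp_keys]; exact PySem.Set.nodup_ofList _

lemma emitOf_singleton (k : String) (i : Int) : emitOf k [i] = [(k, i)] := by
  simp [emitOf, PySem.List.pyRange_one_eq_nil, PySem.List.pyGetD_zero_cons]

lemma emitOf_append (k : String) (idxs : List Int) (i : Int) (h : idxs ≠ []) :
    emitOf k (idxs ++ [i]) = emitOf k idxs ++ [(nameOf k idxs.length, i)] := by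
  have hlen : 1 ≤ idxs.length := by cases idxs <;> simp_all
  have hLL : ((idxs ++ [i]).length : Int) = (idxs.length : Int) + 1 := by simp
  simp only [emitOf, hLL]
  rw [PySem.List.pyRange_one_succ_right (by exact_mod_cast hlen), List.map_append]
  have h0 : PySem.List.pyGetD (idxs ++ [i]) 0 (-1) = PySem.List.pyGetD idxs 0 (-1) := by
    cases idxs with
    | nil => simp_all
    | cons a t => simp [PySem.List.pyGetD_zero_cons]
  have hmap : (PySem.List.pyRange 1 ((idxs.length : Int)) 1).map
        (fun n => (mkSuffixed k n, PySem.List.pyGetD (idxs ++ [i]) n (-1)))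
      = (PySem.List.pyRange 1 ((idxs.length : Int)) 1).map
        (fun n => (mkSuffixed k n, PySem.List.pyGetD idxs n (-1))) := by
    apply List.map_congr_left
    intro n hn
    rw [PySem.List.mem_pyRange_one] at hn
    obtain ⟨m, rfl⟩ : ∃ m : Nat, n = (m : Int) := ⟨n.toNat, by omega⟩
    have hm : m < idxs.length := by exact_mod_cast hn.2
    simp only [PySem.List.pyGetD_natCast]
    rw [List.getD_append _ _ _ _ hm]
  have hlast : PySem.List.pyGetD (idxs ++ [i]) ((idxs.length : Int)) (-1) = i := by
    rw [PySem.List.pyGetD_natCast]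
    simp [List.getD]
  have hname : nameOf k idxs.length = mkSuffixed k (idxs.length : Int) := by
    unfold nameOf; rw [if_neg (by omega)]
  rw [h0, hmap]
  simp only [List.map_cons, List.map_nil, hlast, hname, List.append_assoc]


lemma count_enumerate_filter (keys : List String) (k : String) :
    ((PySem.List.enumerate keys 0).filter (fun p => p.2 == k)).length = keys.count k := by
  rw [← List.countP_eq_length_filter]
  have h1 : ((PySem.List.enumerate keys 0).map (fun p => p.2)).countP (fun x => x == k)
      = (PySem.List.enumerate keys 0).countP (fun p => p.2 == k) := List.countP_map ..
  rw [← h1, PySem.List.map_snd_enumerate, List.count_eq_countP]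

-- the flattened grouped emission is a permutation of the in-order emission
lemma perm_flat (keys : List String) :
    ((grp (PySem.List.enumerate keys 0)).items.flatMap (fun kid => emitOf kid.1 kid.2)).Perm
      (emitAux [] keys 0) := by
  induction keys using List.reverseRecOn with
  | nil => simp [grp, PySem.List.enumerate_nil, emitAux, PySem.Dict.empty]
  | append_singleton keys k ih =>
    have henum : PySem.List.enumerate (keys ++ [k]) 0
        = PySem.List.enumerate keys 0 ++ [((keys.length : Int), k)] := by
      rw [PySem.List.enumerate_append]
      simp [PySem.List.enumerate_cons, PySem.List.enumerate_nil]
    have hgrp : grp (PySem.List.enumerate (keys ++ [k]) 0)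
        = (grp (PySem.List.enumerate keys 0)).insert k
            ((grp (PySem.List.enumerate keys 0)).getD k [] ++ [(keys.length : Int)]) := by
      rw [henum, grp, List.foldl_append]
      rfl
    have hemit : emitAux [] (keys ++ [k]) 0
        = emitAux [] keys 0 ++ [(nameOf k (keys.count k), (keys.length : Int))] := by
      rw [emitAux_append]
      simp [emitAux]
    rw [hgrp, hemit]
    set d := grp (PySem.List.enumerate keys 0) with hd
    set idxs := d.getD k [] with hidxs
    have hlen : idxs.length = keys.count k := by
      rw [hidxs, hd, grp_getD, List.length_map, count_enumerate_filter]
    by_cases hk : d.contains k = true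
    · -- k already grouped: its index list gains one entry in place
      have hmemk : k ∈ keys := by
        have := (PySem.Dict.contains_iff_mem_keys _ _).mp hk
        rw [hd, grp_keys, PySem.Set.mem_ofList, PySem.List.map_snd_enumerate] at this
        exact this
      have hcnt : keys.count k ≠ 0 := by
        simpa [Nat.pos_iff_ne_zero] using List.count_pos_iff.mpr hmemk
      have hne : idxs ≠ [] := by
        intro h0; rw [h0] at hlen; exact hcnt hlen.symm
      have hget : d.get? k = some idxs := by
        rcases h : d.get? k with _ | v
        · rw [PySem.Dict.get?_eq_none_iff_contains] at h; rw [h] at hk; simp at hk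
        · rw [hidxs, PySem.Dict.getD_of_get?_eq_some _ [] h]
      obtain ⟨l₁, l₂, hsplit⟩ := List.append_of_mem (PySem.Dict.mem_items_of_get?_eq_some _ hget)
      have hnodup : (l₁.map (·.1) ++ k :: l₂.map (·.1)).Nodup := by
        have hn := grp_nodup (PySem.List.enumerate keys 0)
        rw [← hd] at hn
        simp only [PySem.Dict.keys, hsplit, List.map_append, List.map_cons] at hn
        exact hn
      rw [List.nodup_append] at hnodup
      obtain ⟨hn1, hn2, hdisj⟩ := hnodup
      have hl₁ : ∀ p ∈ l₁, p.1 ≠ k := by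
        intro p hp hpk
        have hmm : k ∈ l₁.map (·.1) := by
          rw [← hpk]; exact List.mem_map_of_mem hp
        exact hdisj _ hmm _ (List.mem_cons_self ..) rfl
      have hl₂ : ∀ p ∈ l₂, p.1 ≠ k := by
        intro p hp hpk
        have hmm : k ∈ l₂.map (·.1) := by
          rw [← hpk]; exact List.mem_map_of_mem hp
        exact (List.nodup_cons.mp hn2).1 hmm
      have hitems : (d.insert k (idxs ++ [(keys.length : Int)])).items
          = l₁ ++ (k, idxs ++ [(keys.length : Int)]) :: l₂ := by
        rw [PySem.Dict.items_insert_of_contains d _ hk, hsplit]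
        rw [List.map_append, List.map_cons]
        congr 1
        · conv_rhs => rw [← List.map_id l₁]
          apply List.map_congr_left
          intro p hp
          simp [show (p.1 == k) = false from beq_eq_false_iff_ne.mpr (hl₁ p hp)]
        · congr 1
          · simp
          · conv_rhs => rw [← List.map_id l₂]
            apply List.map_congr_left
            intro p hp
            simp [show (p.1 == k) = false from beq_eq_false_iff_ne.mpr (hl₂ p hp)]
      rw [hitems]
      have hflat : (l₁ ++ (k, idxs ++ [(keys.length : Int)]) :: l₂).flatMap
            (fun kid => emitOf kid.1 kid.2)
          = l₁.flatMap (fun kid => emitOf kid.1 kid.2)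
            ++ (emitOf k idxs ++ [(nameOf k idxs.length, (keys.length : Int))])
            ++ l₂.flatMap (fun kid => emitOf kid.1 kid.2) := by
        simp [List.flatMap_append, emitOf_append k idxs _ hne, List.append_assoc]
      rw [hflat]
      have hold : d.items.flatMap (fun kid => emitOf kid.1 kid.2)
          = l₁.flatMap (fun kid => emitOf kid.1 kid.2) ++ emitOf k idxs
            ++ l₂.flatMap (fun kid => emitOf kid.1 kid.2) := by
        rw [hsplit]; simp [List.flatMap_append, List.append_assoc]
      have hperm1 :
          (l₁.flatMap (fun kid => emitOf kid.1 kid.2)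
            ++ (emitOf k idxs ++ [(nameOf k idxs.length, (keys.length : Int))])
            ++ l₂.flatMap (fun kid => emitOf kid.1 kid.2)).Perm
          ((l₁.flatMap (fun kid => emitOf kid.1 kid.2) ++ emitOf k idxs
            ++ l₂.flatMap (fun kid => emitOf kid.1 kid.2))
            ++ [(nameOf k idxs.length, (keys.length : Int))]) := by
        simp only [List.append_assoc]
        refine List.Perm.append_left _ ?_
        refine List.Perm.append_left _ ?_
        exact List.perm_append_comm
      refine hperm1.trans ?_
      rw [← hold, hlen]
      exact (ih.append (List.Perm.refl _))
    · -- new key: appended at the end of the dict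
      have hmemk : k ∉ keys := by
        intro hmem
        apply hk
        rw [PySem.Dict.contains_iff_mem_keys, hd, grp_keys, PySem.Set.mem_ofList,
          PySem.List.map_snd_enumerate]
        exact hmem
      have hcnt : keys.count k = 0 := List.count_eq_zero.mpr hmemk
      have hidx0 : idxs = [] := by
        have := hlen; rw [hcnt] at this; exact List.length_eq_zero_iff.mp this
      rw [PySem.Dict.items_insert_of_not_contains d _ (by simpa using hk), hidx0]
      rw [List.flatMap_append]
      simp only [List.flatMap_cons, List.flatMap_nil, List.append_nil, List.nil_append,
        emitOf_singleton]
      have hname : nameOf k (keys.count k) = k := by simp [nameOf, hcnt]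
      rw [hname]
      exact ih.append (List.Perm.refl _)

lemma emitAux_lb : ∀ (rest pre : List String) (i : Int) (q : String × Int),
    q ∈ emitAux pre rest i → i ≤ q.2 := by
  intro rest
  induction rest with
  | nil => intro pre i q h; simp [emitAux] at h
  | cons r rest ih =>
    intro pre i q h
    simp only [emitAux, List.mem_cons] at h
    rcases h with h | h
    · simp [h]
    · have := ih (pre ++ [r]) (i + 1) q h; omega

lemma emitAux_pairwise : ∀ (rest pre : List String) (i : Int),
    (emitAux pre rest i).Pairwise (fun a b => a.2 < b.2) := by
  intro rest
  induction rest with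
  | nil => intro pre i; simp [emitAux]
  | cons r rest ih =>
    intro pre i
    simp only [emitAux, List.pairwise_cons]
    refine ⟨fun q hq => ?_, ih (pre ++ [r]) (i + 1)⟩
    have := emitAux_lb rest (pre ++ [r]) (i + 1) q hq
    omega

-- A's loop, against the emission spine
lemma fold_eq : ∀ (rest pre : List String) (ukm kc : PySem.Dict String Int),
    (∀ k, kc.contains k = decide (k ∈ pre)) →
    (∀ k, k ∈ pre → kc.getD k 0 = (pre.count k : Int) - 1) →
    ((PySem.List.enumerate rest (pre.length : Int)).foldl aStep (ukm, kc)).1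
      = (emitAux pre rest (pre.length : Int)).foldl (fun d p => d.insert p.1 p.2) ukm := by
  intro rest
  induction rest with
  | nil => intro pre ukm kc _ _; simp [PySem.List.enumerate, emitAux]
  | cons r rest' ih =>
    intro pre ukm kc hc hg
    rw [PySem.List.enumerate_cons, List.foldl_cons]
    simp only [emitAux, List.foldl_cons]
    by_cases hmem : r ∈ pre
    · have hcnt : pre.count r ≠ 0 := by
        simpa [Nat.pos_iff_ne_zero] using List.count_pos_iff.mpr hmem
      have hstep : aStep (ukm, kc) ((pre.length : Int), r)
          = (ukm.insert (mkSuffixed r (pre.count r : Int)) (pre.length : Int),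
             kc.insert r (pre.count r : Int)) := by
        have hct : kc.contains r = true := by rw [hc]; simpa using hmem
        have hgr := hg r hmem
        have harith : ((pre.count r : Int) - 1 + 1) = (pre.count r : Int) := by ring
        simp only [aStep, hct, if_true, hgr, harith]
      rw [hstep]
      have hname : nameOf r (pre.count r) = mkSuffixed r (pre.count r : Int) := by
        simp [nameOf, hcnt]
      rw [hname]
      have := ih (pre ++ [r]) (ukm.insert (mkSuffixed r (pre.count r : Int)) (pre.length : Int))
        (kc.insert r (pre.count r : Int))
        (by
          intro k
          rw [PySem.Dict.contains_insert, hc]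
          by_cases hkr : k = r <;> simp [hkr, hmem])
        (by
          intro k hkmem
          rw [PySem.Dict.getD_insert]
          by_cases hkr : k = r
          · subst hkr
            simp [List.count_append]
          · have : k ∈ pre := by
              rcases List.mem_append.mp hkmem with h | h
              · exact h
              · simp at h; exact absurd h hkr
            have hrk : r ≠ k := fun h => hkr h.symm
            simp [hkr, hrk, hg k this, List.count_append])
      simpa [List.length_append] using this
    · have hcnt : pre.count r = 0 := by
        simpa using List.count_eq_zero.mpr hmem
      have hstep : aStep (ukm, kc) ((pre.length : Int), r)
          = (ukm.insert r (pre.length : Int), kc.insert r 0) := by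
        have hct : kc.contains r = false := by rw [hc]; simpa using hmem
        simp [aStep, hct]
      rw [hstep]
      have hname : nameOf r (pre.count r) = r := by simp [nameOf, hcnt]
      rw [hname]
      have := ih (pre ++ [r]) (ukm.insert r (pre.length : Int)) (kc.insert r 0)
        (by
          intro k
          rw [PySem.Dict.contains_insert, hc]
          by_cases hkr : k = r <;> simp [hkr])
        (by
          intro k hkmem
          rw [PySem.Dict.getD_insert]
          by_cases hkr : k = r
          · subst hkr
            simp [List.count_append, hcnt]
          · have : k ∈ pre := by
              rcases List.mem_append.mp hkmem with h | h
              · exact h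
              · simp at h; exact absurd h hkr
            have hrk : r ≠ k := fun h => hkr h.symm
            simp [hkr, hrk, hg k this, List.count_append])
      simpa [List.length_append] using this

-- B's renamed list (before sorting) is the flatMap of emitOf over the groups
lemma renamed_eq (keys : List String) :
    (grp (PySem.List.enumerate keys 0)).items.foldl
      (fun acc kid =>
        (PySem.List.pyRange 1 ((kid.2.length : Int)) 1).foldl
          (fun acc2 n => acc2 ++ [(mkSuffixed kid.1 n, PySem.List.pyGetD kid.2 n (-1))])
          (acc ++ [(kid.1, PySem.List.pyGetD kid.2 0 (-1))]))
      []
    = (grp (PySem.List.enumerate keys 0)).items.flatMap (fun kid => emitOf kid.1 kid.2) := by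
  have hcongr := PySem.List.foldl_congr_mem
    (l := (grp (PySem.List.enumerate keys 0)).items)
    (init := ([] : List (String × Int)))
    (f := fun acc kid =>
      (PySem.List.pyRange 1 ((kid.2.length : Int)) 1).foldl
        (fun acc2 n => acc2 ++ [(mkSuffixed kid.1 n, PySem.List.pyGetD kid.2 n (-1))])
        (acc ++ [(kid.1, PySem.List.pyGetD kid.2 0 (-1))]))
    (g := fun acc kid => acc ++ emitOf kid.1 kid.2)
    (by
      intro acc kid hkid
      dsimp only
      rw [PySem.List.foldl_append_singleton_eq_map]
      simp [emitOf, List.append_assoc])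
  rw [hcongr, PySem.List.foldl_append_eq_flatMap]
  simp

-- the sort rebuilds the in-order emission exactly
lemma sorted_flat (keys : List String) :
    PySem.List.sorted
      ((grp (PySem.List.enumerate keys 0)).items.flatMap (fun kid => emitOf kid.1 kid.2))
      (fun item => item.2) false
    = emitAux [] keys 0 := by
  apply PySem.List.sorted_eq_of_perm_of_pairwise_lt
  · exact ((perm_flat keys).symm)
  · exact emitAux_pairwise keys [] 0

-- ===== VERDICT (by name: the statement is the Claim_ definition above) =====
lemma alt_eq (keys : List String) :
    make_unique_keys_alt keys
      = ((emitAux [] keys 0).foldl (fun d p => d.insert p.1 p.2) PySem.Dict.empty).items := by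
  show ((PySem.List.sorted
      ((grp (PySem.List.enumerate keys 0)).items.foldl
        (fun acc kid =>
          (PySem.List.pyRange 1 ((kid.2.length : Int)) 1).foldl
            (fun acc2 n => acc2 ++ [(mkSuffixed kid.1 n, PySem.List.pyGetD kid.2 n (-1))])
            (acc ++ [(kid.1, PySem.List.pyGetD kid.2 0 (-1))]))
        [])
      (fun item => item.2) false).foldl
        (fun d p => d.insert p.1 p.2) PySem.Dict.empty).items = _
  rw [renamed_eq keys, sorted_flat keys]

theorem make_unique_keys_spec : Claim_equal_make_unique_keys := by
  intro keys _
  unfold Spec_make_unique_keys make_unique_keys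
  have hA := fold_eq keys [] PySem.Dict.empty PySem.Dict.empty
    (by intro k; simp [PySem.Dict.contains_empty]) (by intro k h; simp at h)
  simp only [List.length_nil, Nat.cast_zero] at hA
  rw [alt_eq keys, hA]
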